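-- pv_equiv track=rewrite | github.com/CH-CHISAKA/lockbox | UserInterface/sendWindow.py | _is_valid_phone_number
-- ===== SOURCE A (Python) =====
-- def _is_valid_phone_number(phone: str) -> bool:
--     """Validates Kenyan phone numbers including all valid prefixes."""
--
--     # Valid 07xx and 01xx prefixes
--     valid_prefixes = (
--         # 07xx legacy
--         "070", "071", "072", "073", "0740", "0741", "0742", "0743", "0745", "0746",
--         "0748", "0757", "0758", "0759", "0768", "0769", "0770", "0771", "0772",
--         "0780", "0781", "0782", "0783", "0784", "0785", "0786", "0787", "0788",
--         "0790", "0791", "0792", "0793", "0794", "0795", "0796", "0797", "0798", "0799",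
--         # 01xx current
--         "0100", "0101", "0102", "0103", "0104", "0105", "0106", "0107", "0108", "0109",
--         "0110", "0111", "0112", "0113", "0114", "0115", "0116", "0117", "0118", "0119"
--     )
--
--     phone = phone.strip()
--
--     # Local: 0XXXXXXXXX
--     if phone.startswith("0") and len(phone) == 10:
--         return any(phone.startswith(p) for p in valid_prefixes)
--
--     # International: +254XXXXXXXXX
--     elif phone.startswith("+254") and len(phone) == 13:
--         suffix = phone[4:]
--         return any(suffix.startswith(p[1:]) for p in valid_prefixes)  # compare with stripped prefix
--
--     return False
-- ===== SOURCE B (Python) =====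
-- def _is_valid_phone_number(phone: str) -> bool:
--     """Validates Kenyan phone numbers including all valid prefixes."""
--     phone = phone.strip()
--     if len(phone) == 13 and phone.startswith("+254"):
--         phone = "0" + phone[4:]  # normalize international form to local form
--     if len(phone) != 10 or phone[0] != "0":
--         return False
--     # classify by the numeric value of the digits after the leading 0
--     a = ord(phone[1]) - 48
--     b = ord(phone[2]) - 48
--     c = ord(phone[3]) - 48
--     if not (0 <= a <= 9 and 0 <= b <= 9):
--         return False
--     m = a * 10 + b
--     if 70 <= m <= 73:
--         return True
--     if not 0 <= c <= 9:
--         return False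
--     n = m * 10 + c
--     return (740 <= n <= 748 and n != 744 and n != 747) \
--         or 757 <= n <= 759 or 768 <= n <= 772 \
--         or (780 <= n <= 799 and n != 789) or 100 <= n <= 119
-- ===== Notes on version B (the rewrite author's own statement) =====
-- stated objective: alternative
-- what changed: B replaces the 60-entry prefix table and its per-prefix startswith scan with a closed-form numeric classifier: it normalizes +254 numbers to local form, converts the three digits after the leading 0 to an integer, and decides validity by interval checks (70-73, 740-748 minus 744/747, 757-759, 768-772, 780-799 minus 789, 100-119).
import Mathlib
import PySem

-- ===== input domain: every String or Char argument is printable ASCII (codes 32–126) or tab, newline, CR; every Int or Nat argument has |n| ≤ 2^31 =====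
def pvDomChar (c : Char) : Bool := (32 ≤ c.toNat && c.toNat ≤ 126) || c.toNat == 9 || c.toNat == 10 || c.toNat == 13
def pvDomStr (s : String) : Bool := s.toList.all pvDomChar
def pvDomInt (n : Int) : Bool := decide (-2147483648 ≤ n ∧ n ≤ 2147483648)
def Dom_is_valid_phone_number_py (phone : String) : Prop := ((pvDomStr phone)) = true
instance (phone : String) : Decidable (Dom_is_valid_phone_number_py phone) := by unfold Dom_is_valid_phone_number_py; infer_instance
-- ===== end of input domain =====

-- B replaces the 60-entry prefix table and its per-prefix startswith scan by a closed-form numeric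
-- classifier: normalize +254 to local form, read the three digits after the leading 0 as an integer,
-- and decide validity by interval checks (alternative decomposition; no speed claim).

-- ===== PORT A =====
def pvPrefixes : List String := [
  "070", "071", "072", "073", "0740", "0741", "0742", "0743", "0745", "0746",
  "0748", "0757", "0758", "0759", "0768", "0769", "0770", "0771", "0772",
  "0780", "0781", "0782", "0783", "0784", "0785", "0786", "0787", "0788",
  "0790", "0791", "0792", "0793", "0794", "0795", "0796", "0797", "0798", "0799",
  "0100", "0101", "0102", "0103", "0104", "0105", "0106", "0107", "0108", "0109",
  "0110", "0111", "0112", "0113", "0114", "0115", "0116", "0117", "0118", "0119"]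

def is_valid_phone_number_py (phone : String) : Bool :=
  let phone := PySem.Str.strip phone
  if PySem.Str.startswith phone "0" && (PySem.Str.len phone == 10) then
    pvPrefixes.any (fun p => PySem.Str.startswith phone p)
  else if PySem.Str.startswith phone "+254" && (PySem.Str.len phone == 13) then
    let suffix := PySem.Str.slice phone (some 4) none
    pvPrefixes.any (fun p => PySem.Str.startswith suffix (PySem.Str.slice p (some 1) none))
  else
    false

-- ===== PORT B =====
-- ord(ch) is the character's codepoint: ported as Char.toNat (exact).
def is_valid_phone_number_py_alt (phone : String) : Bool :=
  let s0 := PySem.Str.strip phone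
  let s := if (PySem.Str.len s0 == 13) && PySem.Str.startswith s0 "+254"
           then "0" ++ PySem.Str.slice s0 (some 4) none else s0
  if !(PySem.Str.len s == 10) || !(((PySem.Str.pyGet? s 0).getD ' ') == '0') then false
  else
    let a : Int := (((PySem.Str.pyGet? s 1).getD ' ').toNat : Int) - 48
    let b : Int := (((PySem.Str.pyGet? s 2).getD ' ').toNat : Int) - 48
    let c : Int := (((PySem.Str.pyGet? s 3).getD ' ').toNat : Int) - 48
    if !(0 ≤ a && a ≤ 9 && 0 ≤ b && b ≤ 9) then false
    else
      let m := a * 10 + b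
      if 70 ≤ m && m ≤ 73 then true
      else if !(0 ≤ c && c ≤ 9) then false
      else
        let n := m * 10 + c
        (740 ≤ n && n ≤ 748 && n != 744 && n != 747) ||
        (757 ≤ n && n ≤ 759) || (768 ≤ n && n ≤ 772) ||
        (780 ≤ n && n ≤ 799 && n != 789) || (100 ≤ n && n ≤ 119)

-- ===== PRECONDITION & SPEC =====
def Spec_is_valid_phone_number_py (phone : String) (out : Bool) : Prop := out = is_valid_phone_number_py_alt phone
instance (phone : String) (out : Bool) : Decidable (Spec_is_valid_phone_number_py phone out) := by unfold Spec_is_valid_phone_number_py; infer_instance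

-- ===== CLAIM (what is proved, stated in full; the proofs are below) =====
def Claim_equal_is_valid_phone_number_py : Prop := ∀ (phone : String), Dom_is_valid_phone_number_py phone → Spec_is_valid_phone_number_py phone (is_valid_phone_number_py phone)

-- ===== LEMMAS AND PROOFS =====
set_option maxRecDepth 8192

lemma sw_toList (s p : String) : PySem.Str.startswith s p = p.toList.isPrefixOf s.toList := by
  simp [PySem.Str.startswith_eq, PySem.Chars.startswith]

lemma charEq (c d : Char) : c = d ↔ c.toNat = d.toNat := by
  constructor
  · intro h; rw [h]
  · intro h; exact Char.ext (UInt32.toNat_inj.mp h)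

-- destructure a length-10 string starting with '0'
lemma destruct10 (l : List Char) (h0 : (['0'] : List Char).isPrefixOf l) (hlen : l.length = 10) :
    ∃ c1 c2 c3 r, l = '0' :: c1 :: c2 :: c3 :: r ∧ r.length = 6 := by
  rcases l with _ | ⟨a, _ | ⟨b, _ | ⟨c, _ | ⟨d, r⟩⟩⟩⟩ <;> simp_all [List.isPrefixOf]
  exact h0.symm

-- destructure a length-13 string starting with "+254"
lemma destruct13 (l : List Char) (h0 : (['+','2','5','4'] : List Char).isPrefixOf l) (hlen : l.length = 13) :
    ∃ e0 e1 e2 r, l = '+' :: '2' :: '5' :: '4' :: e0 :: e1 :: e2 :: r ∧ r.length = 6 := by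
  rcases l with _ | ⟨a, _ | ⟨b, _ | ⟨c, _ | ⟨d, _ | ⟨e, _ | ⟨f, _ | ⟨g, r⟩⟩⟩⟩⟩⟩⟩ <;>
    simp_all [List.isPrefixOf]
  exact ⟨h0.1.symm, h0.2.1.symm, h0.2.2.1.symm, h0.2.2.2.symm⟩

-- B's first-character test agrees with A's startswith "0"
lemma first_char (s : String) : (((PySem.Str.pyGet? s 0).getD ' ') == '0') = PySem.Str.startswith s "0" := by
  rw [show ((0:Int)) = ((0:Nat):Int) from rfl, PySem.Str.pyGet?_natCast]
  simp only [PySem.Str.startswith_eq, PySem.Chars.startswith]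
  cases h : s.toList with
  | nil => simp
  | cons a l => simp [List.isPrefixOf, eq_comm]

-- flatten B's guard cascade into one boolean expression
lemma flatten (g1 g2 g3 e : Bool) :
    (if !g1 then false else if g2 then true else if !g3 then false else e) =
    (g1 && (g2 || (g3 && e))) := by
  cases g1 <;> cases g2 <;> cases g3 <;> simp

set_option maxHeartbeats 1000000 in
-- the heart: on a length-10 string '0'·c1·c2·c3·r, A's 60-prefix scan equals B's numeric classifier
lemma core (c1 c2 c3 : Char) (r : List Char) (s : String)
    (hs : s.toList = '0' :: c1 :: c2 :: c3 :: r) :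
    (pvPrefixes.any (fun p => PySem.Str.startswith s p)) =
    (let a : Int := (c1.toNat : Int) - 48
     let b : Int := (c2.toNat : Int) - 48
     let c : Int := (c3.toNat : Int) - 48
     if !(0 ≤ a && a ≤ 9 && 0 ≤ b && b ≤ 9) then false
     else
       let m := a * 10 + b
       if 70 ≤ m && m ≤ 73 then true
       else if !(0 ≤ c && c ≤ 9) then false
       else
         let n := m * 10 + c
         (740 ≤ n && n ≤ 748 && n != 744 && n != 747) ||
         (757 ≤ n && n ≤ 759) || (768 ≤ n && n ≤ 772) ||
         (780 ≤ n && n ≤ 799 && n != 789) || (100 ≤ n && n ≤ 119)) := by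
  simp only [pvPrefixes, List.any_cons, List.any_nil, sw_toList, hs]
  simp only [flatten]
  rw [Bool.eq_iff_iff]
  simp [List.isPrefixOf, charEq]
  generalize c1.toNat = x
  generalize c2.toNat = y
  generalize c3.toNat = z
  constructor
  · intro h; omega
  · intro h
    obtain ⟨hd, h2⟩ := h
    rcases h2 with hm | ⟨hz, h3⟩
    · have hx : x = 55 := by omega
      have hy1 : 48 ≤ y := by omega
      have hy2 : y ≤ 51 := by omega
      subst hx
      interval_cases y <;> simp
    · obtain ⟨hz1, hz2⟩ := hz
      rcases h3 with ((((hA | hB) | hC) | hD) | hE)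
      · have hx : x = 55 := by omega
        have hy : y = 52 := by omega
        subst hx; subst hy
        interval_cases z <;> first | (simp; done) | (exfalso; omega)
      · have hx : x = 55 := by omega
        have hy : y = 53 := by omega
        subst hx; subst hy
        interval_cases z <;> first | (simp; done) | (exfalso; omega)
      · have hx : x = 55 := by omega
        have hy : y = 54 ∨ y = 55 := by omega
        subst hx
        rcases hy with hy | hy <;> subst hy <;>
          interval_cases z <;> first | (simp; done) | (exfalso; omega)
      · have hx : x = 55 := by omega
        have hy : y = 56 ∨ y = 57 := by omega
        subst hx
        rcases hy with hy | hy <;> subst hy <;>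
          interval_cases z <;> first | (simp; done) | (exfalso; omega)
      · have hx : x = 49 := by omega
        have hy : y = 48 ∨ y = 49 := by omega
        subst hx
        rcases hy with hy | hy <;> subst hy <;>
          interval_cases z <;> simp

-- the international scan with stripped prefixes equals the local scan on the normalized string
lemma intl_eq (e0 e1 e2 : Char) (r : List Char) (s : String)
    (hs : s.toList = '+' :: '2' :: '5' :: '4' :: e0 :: e1 :: e2 :: r) :
    (pvPrefixes.any (fun p =>
        PySem.Str.startswith (PySem.Str.slice s (some 4) none) (PySem.Str.slice p (some 1) none))) =
    (pvPrefixes.any (fun p =>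
        PySem.Str.startswith ("0" ++ PySem.Str.slice s (some 4) none) p)) := by
  simp only [pvPrefixes, List.any_cons, List.any_nil, sw_toList]
  simp [String.toList_append, PySem.Str.toList_slice, PySem.Chars.slice_eq_listSlice,
    PySem.List.slice, List.isPrefixOf, hs]

-- ===== VERDICT (by name: the statement is the Claim_ definition above) =====
theorem is_valid_phone_number_py_spec : Claim_equal_is_valid_phone_number_py := by
  intro phone _
  unfold Spec_is_valid_phone_number_py
  unfold is_valid_phone_number_py is_valid_phone_number_py_alt
  generalize PySem.Str.strip phone = s
  by_cases hL : (PySem.Str.startswith s "0" && (PySem.Str.len s == 10)) = true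
  · -- local format: B does not normalize and its guard passes
    obtain ⟨h1, h2⟩ := (Bool.and_eq_true _ _).mp hL
    have h0 : (['0'] : List Char).isPrefixOf s.toList = true := by
      have := h1; rw [sw_toList] at this; simpa using this
    have hlen : s.toList.length = 10 := by
      simp [PySem.Str.len_eq] at h2; exact_mod_cast h2
    obtain ⟨c1, c2, c3, rr, hs, _⟩ := destruct10 s.toList h0 hlen
    have hnorm : ((PySem.Str.len s == 13) && PySem.Str.startswith s "+254") = false := by
      have h13 : (PySem.Str.len s == (13 : Int)) = false := by
        rw [PySem.Str.len_eq, hlen]; decide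
      rw [h13, Bool.false_and]
    have hguard : (!(PySem.Str.len s == 10) || !(((PySem.Str.pyGet? s 0).getD ' ') == '0')) = false := by
      rw [first_char]
      simp only [h1, h2]
      decide
    simp only [hL, hnorm, hguard, if_true, if_false, Bool.false_eq_true]
    rw [core c1 c2 c3 rr s hs]
    simp [pysem, hs]
  · by_cases hI : (PySem.Str.startswith s "+254" && (PySem.Str.len s == 13)) = true
    · -- international format: B normalizes to "0" ++ s[4:]
      obtain ⟨h1, h2⟩ := (Bool.and_eq_true _ _).mp hI
      have h0 : (['+','2','5','4'] : List Char).isPrefixOf s.toList = true := by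
        have := h1; rw [sw_toList] at this; simpa using this
      have hlen : s.toList.length = 13 := by
        simp [PySem.Str.len_eq] at h2; exact_mod_cast h2
      obtain ⟨e0, e1, e2, rr, hs, hr⟩ := destruct13 s.toList h0 hlen
      have hLf : (PySem.Str.startswith s "0" && (PySem.Str.len s == 10)) = false :=
        Bool.eq_false_iff.mpr (fun h => hL h)
      have hnorm : ((PySem.Str.len s == 13) && PySem.Str.startswith s "+254") = true := by
        rw [Bool.and_comm]; exact hI
      have hs'' : ("0" ++ PySem.Str.slice s (some 4) none).toList
          = '0' :: e0 :: e1 :: e2 :: rr := by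
        simp [String.toList_append, PySem.Str.toList_slice, PySem.Chars.slice_eq_listSlice,
          PySem.List.slice, hs]
      have hlen10 : (PySem.Str.len ("0" ++ PySem.Str.slice s (some 4) none) == 10) = true := by
        rw [PySem.Str.len_eq, hs'']
        simp [hr]
      have hsw0 : (((PySem.Str.pyGet? ("0" ++ PySem.Str.slice s (some 4) none) 0).getD ' ') == '0')
          = true := by
        rw [first_char, sw_toList, hs'']
        simp [List.isPrefixOf]
      have hguard : (!(PySem.Str.len ("0" ++ PySem.Str.slice s (some 4) none) == 10)
          || !(((PySem.Str.pyGet? ("0" ++ PySem.Str.slice s (some 4) none) 0).getD ' ') == '0')) = false := by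
        rw [hlen10, hsw0]; decide
      simp only [hLf, hnorm, hguard, if_true, if_false, Bool.false_eq_true]
      rw [intl_eq e0 e1 e2 rr s hs, core e0 e1 e2 rr _ hs'']
      simp [pysem, hs'']
      intro _ _ _ _ _
      refine ⟨List.isPrefixOf_iff_prefix.mp h0, ?_⟩
      have hl : s.length = 13 := hlen
      exact_mod_cast hl
    · -- neither format: both return False
      have hLf : (PySem.Str.startswith s "0" && (PySem.Str.len s == 10)) = false :=
        Bool.eq_false_iff.mpr (fun h => hL h)
      have hIf : (PySem.Str.startswith s "+254" && (PySem.Str.len s == 13)) = false :=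
        Bool.eq_false_iff.mpr (fun h => hI h)
      have hnorm : ((PySem.Str.len s == 13) && PySem.Str.startswith s "+254") = false := by
        rw [Bool.and_comm]; exact hIf
      have hguard : (!(PySem.Str.len s == 10) || !(((PySem.Str.pyGet? s 0).getD ' ') == '0')) = true := by
        rw [first_char]
        cases hb1 : PySem.Str.startswith s "0" <;>
          cases hb2 : (PySem.Str.len s == (10 : Int)) <;> simp_all
      simp only [hLf, hIf, hnorm, hguard, if_true, if_false, Bool.false_eq_true]
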